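-- pv_equiv track=rewrite | github.com/happa64/AtCoder_Beginner_Contest | Unrated/Typical90/Typical90_067.py | trans_nine
-- ===== SOURCE A (Python) =====
-- def trans_nine(x):
--     res = ""
--     while x:
--         x, r = divmod(x, 9)
--         if r == 8:
--             r = 5
--         res += str(r)
--     return int(res[::-1])
-- ===== SOURCE B (Python) =====
-- def trans_nine(x):
--     p = 1
--     while p * 9 <= x:
--         p *= 9
--     s = ""
--     while p:
--         d = x // p
--         x -= d * p
--         s += str(5 if d == 8 else d)
--         p //= 9
--     return int(s)
-- ===== Notes on version B (the rewrite author's own statement) =====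
-- stated objective: alternative
-- what changed: Replaces the bottom-up divmod loop that collects digits least-significant-first and reverses the string by top-down long division: find the largest power of 9 not exceeding x, then repeatedly divide by descending powers to emit digits most-significant-first with no reversal.
-- outside the precondition, e.g. on trans_nine(0): A raises ValueError, B returns 0
import Mathlib
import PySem

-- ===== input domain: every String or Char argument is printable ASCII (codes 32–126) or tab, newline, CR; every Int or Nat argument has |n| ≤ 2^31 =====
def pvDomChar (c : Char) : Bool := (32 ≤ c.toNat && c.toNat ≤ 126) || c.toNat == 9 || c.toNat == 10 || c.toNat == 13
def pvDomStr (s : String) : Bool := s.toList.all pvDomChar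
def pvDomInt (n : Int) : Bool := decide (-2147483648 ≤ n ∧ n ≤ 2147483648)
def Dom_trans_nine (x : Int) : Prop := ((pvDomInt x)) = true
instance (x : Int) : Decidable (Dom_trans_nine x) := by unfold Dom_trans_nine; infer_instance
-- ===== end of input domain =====

-- B replaces A's bottom-up divmod loop (collect digits LSB-first, reverse, int()) by
-- top-down long division from the largest power of 9, emitting digits MSB-first.


-- ===== PORT A =====
-- A's while-loop; fuel only makes it total (64 ≫ the ≤ 11 base-9 digits of any x in Dom with x ≥ 1)
def transNineLoop (fuel : Nat) (x : Int) (res : List Char) : List Char :=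
  match fuel with
  | 0 => res
  | fuel + 1 =>
    if x ≠ 0 then
      -- x, r = divmod(x, 9)
      let q := PySem.Int.floordiv x 9
      let r := PySem.Int.mod x 9
      let r' := if r = 8 then 5 else r
      transNineLoop fuel q (res ++ PySem.Int.toChars r')
    else res

-- int(res[::-1]); int('') raises ValueError, excluded by Pre_ (getD 0 is never reached on Pre_)
def trans_nine (x : Int) : Int :=
  (PySem.Int.ofChars? (transNineLoop 64 x []).reverse).getD 0

-- ===== PORT B =====
-- first loop of Source B: p = 1; while p * 9 <= x: p *= 9   (fuel only makes it total)
def transNineFindPow (fuel : Nat) (x p : Int) : Int :=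
  match fuel with
  | 0 => p
  | fuel + 1 => if p * 9 ≤ x then transNineFindPow fuel x (p * 9) else p

-- second loop of Source B: while p: d = x//p; x -= d*p; s += str(5 if d==8 else d); p //= 9
def transNineLongDiv (fuel : Nat) (x p : Int) (s : List Char) : List Char :=
  match fuel with
  | 0 => s
  | fuel + 1 =>
    if p ≠ 0 then
      let d := PySem.Int.floordiv x p
      transNineLongDiv fuel (x - d * p) (PySem.Int.floordiv p 9)
        (s ++ PySem.Int.toChars (if d = 8 then 5 else d))
    else s

def trans_nine_alt (x : Int) : Int :=
  (PySem.Int.ofChars? (transNineLongDiv 64 x (transNineFindPow 64 x 1) [])).getD 0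

-- ===== PRECONDITION & SPEC =====
-- A raises ValueError at x = 0 (int('') on the empty digit string) and loops forever for x < 0; Pre_ keeps x ≥ 1.
def Pre_trans_nine (x : Int) : Prop := 1 ≤ x
instance (x : Int) : Decidable (Pre_trans_nine x) := by unfold Pre_trans_nine; infer_instance
def pvWitness_trans_nine : Int := 8

def Spec_trans_nine (x : Int) (out : Int) : Prop := out = trans_nine_alt x
instance (x : Int) (out : Int) : Decidable (Spec_trans_nine x out) := by unfold Spec_trans_nine; infer_instance

-- ===== CLAIM (what is proved, stated in full; the proofs are below) =====
def Claim_equal_trans_nine : Prop := ∀ (x : Int), Dom_trans_nine x → Pre_trans_nine x → Spec_trans_nine x (trans_nine x)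

-- ===== LEMMAS AND PROOFS =====

-- the remapped digit character str(5 if m == 8 else m), over Nat
def pvDChar (m : Nat) : List Char := PySem.Int.toChars (if m = 8 then 5 else (m : Int))

-- base-9 remapped digit string of n, most-significant digit first (reference object)
def pvDigs : Nat → List Char
  | 0 => []
  | n + 1 => pvDigs ((n + 1) / 9) ++ pvDChar ((n + 1) % 9)
decreasing_by exact Nat.div_lt_self (Nat.succ_pos n) (by omega)

lemma floordiv_cast9 (n : Nat) : PySem.Int.floordiv (n : Int) 9 = ((n / 9 : Nat) : Int) := by
  exact_mod_cast PySem.Int.floordiv_natCast n 9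

lemma mod_cast9 (n : Nat) : PySem.Int.mod (n : Int) 9 = ((n % 9 : Nat) : Int) := by
  exact_mod_cast PySem.Int.mod_natCast n 9

-- exactly k+1 digits of n (n < 9^(k+1)), MSB first, including leading zeros
def pvPadDigs : Nat → Nat → List Char
  | 0, n => pvDChar n
  | k + 1, n => pvDChar (n / 9 ^ (k + 1)) ++ pvPadDigs k (n % 9 ^ (k + 1))

lemma pvDigs_ne_zero (n : Nat) (h : n ≠ 0) :
    pvDigs n = pvDigs (n / 9) ++ pvDChar (n % 9) := by
  cases n with
  | zero => exact absurd rfl h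
  | succ m => rw [pvDigs]

lemma pvDChar_reverse (m : Nat) (h : m < 9) : (pvDChar m).reverse = pvDChar m := by
  interval_cases m <;> decide

lemma dchar_cast (m : Nat) :
    PySem.Int.toChars (if (m : Int) = 8 then 5 else (m : Int)) = pvDChar m := by
  unfold pvDChar
  congr 1
  split_ifs with h1 h2 h2 <;> first | rfl | omega

-- A's loop appends (pvDigs n).reverse to res
lemma transNineLoop_eq (fuel : Nat) :
    ∀ (n : Nat), n < 9 ^ fuel → ∀ (res : List Char),
      transNineLoop fuel (n : Int) res = res ++ (pvDigs n).reverse := by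
  induction fuel with
  | zero =>
    intro n hn res
    interval_cases n
    simp [transNineLoop, pvDigs]
  | succ fuel ih =>
    intro n hn res
    by_cases h0 : n = 0
    · subst h0; simp [transNineLoop, pvDigs]
    · have hcast : ((n : Int) ≠ 0) := by exact_mod_cast h0
      have hdiv : n / 9 < 9 ^ fuel := by
        rw [Nat.div_lt_iff_lt_mul (by omega)]
        calc n < 9 ^ (fuel + 1) := hn
          _ = 9 ^ fuel * 9 := by ring
      rw [transNineLoop]
      simp only [hcast, ne_eq, not_false_eq_true, if_pos]
      rw [floordiv_cast9, mod_cast9, ih (n / 9) hdiv,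
        dchar_cast, pvDigs_ne_zero n h0]
      simp [List.append_assoc, pvDChar_reverse (n % 9) (Nat.mod_lt n (by omega))]

-- pvPadDigs also peels the LEAST significant digit
lemma pvPadDigs_lsb : ∀ (k r : Nat),
    pvPadDigs (k + 1) r = pvPadDigs k (r / 9) ++ pvDChar (r % 9) := by
  intro k
  induction k with
  | zero => intro r; rfl
  | succ k ih =>
    intro r
    show pvDChar (r / 9 ^ (k + 2)) ++ pvPadDigs (k + 1) (r % 9 ^ (k + 2)) = _
    rw [ih (r % 9 ^ (k + 2))]
    have h1 : r % 9 ^ (k + 2) / 9 = r / 9 % 9 ^ (k + 1) := by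
      rw [pow_succ' 9 (k+1), Nat.mod_mul_right_div_self]
    have h2 : r % 9 ^ (k + 2) % 9 = r % 9 := by
      exact Nat.mod_mod_of_dvd r (dvd_pow_self 9 (by omega))
    have h3 : r / 9 ^ (k + 2) = r / 9 / 9 ^ (k + 1) := by
      rw [Nat.div_div_eq_div_mul, ← pow_succ' 9 (k+1)]
    rw [h1, h2, h3]
    simp [pvPadDigs, List.append_assoc]

-- decompose pvDigs at the most significant digit
lemma pvDigs_decomp : ∀ (k d r : Nat), 1 ≤ d → d < 9 → r < 9 ^ (k + 1) →
    pvDigs (d * 9 ^ (k + 1) + r) = pvDChar d ++ pvPadDigs k r := by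
  intro k
  induction k with
  | zero =>
    intro d r h1 h9 hr
    have hn : d * 9 ^ 1 + r ≠ 0 := by positivity
    rw [pvDigs_ne_zero _ hn]
    have hdiv : (d * 9 ^ 1 + r) / 9 = d := by omega
    have hmod : (d * 9 ^ 1 + r) % 9 = r := by omega
    rw [hdiv, hmod, pvDigs_ne_zero d (by omega)]
    have : d / 9 = 0 := by omega
    rw [this, Nat.mod_eq_of_lt h9]
    simp [pvDigs, pvPadDigs]
  | succ k ih =>
    intro d r h1 h9 hr
    have hn : d * 9 ^ (k + 2) + r ≠ 0 := by positivity
    rw [pvDigs_ne_zero _ hn]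
    have hdiv : (d * 9 ^ (k + 2) + r) / 9 = d * 9 ^ (k + 1) + r / 9 := by
      rw [pow_succ 9 (k+1)]
      rw [show d * (9 ^ (k + 1) * 9) + r = (d * 9 ^ (k + 1)) * 9 + r by ring]
      omega
    have hmod : (d * 9 ^ (k + 2) + r) % 9 = r % 9 := by
      have : 9 ∣ d * 9 ^ (k + 2) := Dvd.dvd.mul_left (dvd_pow_self 9 (by omega)) d
      omega
    have hr9 : r / 9 < 9 ^ (k + 1) := by
      rw [Nat.div_lt_iff_lt_mul (by omega)]
      calc r < 9 ^ (k + 2) := hr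
        _ = 9 ^ (k + 1) * 9 := by ring
    rw [hdiv, hmod, ih d (r / 9) h1 h9 hr9, pvPadDigs_lsb]
    simp [List.append_assoc]

-- for 9^k ≤ n < 9^(k+1), the padded k+1-digit string is exactly pvDigs n
lemma pvPadDigs_eq_pvDigs (k n : Nat) (hlo : 9 ^ k ≤ n) (hhi : n < 9 ^ (k + 1)) :
    pvPadDigs k n = pvDigs n := by
  cases k with
  | zero =>
    have h1 : 1 ≤ n := hlo
    have hn9 : n < 9 := by simpa using hhi
    rw [pvDigs_ne_zero n (by omega)]
    have : n / 9 = 0 := Nat.div_eq_of_lt hn9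
    rw [this, Nat.mod_eq_of_lt hn9]
    simp [pvDigs, pvPadDigs]
  | succ k =>
    have h9 : (0:Nat) < 9 ^ (k + 1) := by positivity
    have hd1 : 1 ≤ n / 9 ^ (k + 1) := (Nat.one_le_div_iff h9).mpr hlo
    have hd9 : n / 9 ^ (k + 1) < 9 := by
      rw [Nat.div_lt_iff_lt_mul h9]
      calc n < 9 ^ (k + 2) := hhi
        _ = 9 * 9 ^ (k + 1) := by ring
    have hrec : n = n / 9 ^ (k + 1) * 9 ^ (k + 1) + n % 9 ^ (k + 1) :=
      (Nat.div_add_mod' n (9 ^ (k + 1))).symm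
    conv_rhs => rw [hrec]
    rw [pvDigs_decomp k (n / 9 ^ (k + 1)) (n % 9 ^ (k + 1)) hd1 hd9
      (Nat.mod_lt n h9)]
    simp [pvPadDigs]

-- B's first loop finds the largest power of 9 not exceeding x
lemma transNineFindPow_eq (fuel : Nat) :
    ∀ (j : Nat) (n : Nat), 9 ^ j ≤ n → n < 9 ^ (j + fuel) →
      ∃ k, transNineFindPow fuel (n : Int) ((9 ^ j : Nat) : Int) = ((9 ^ k : Nat) : Int)
        ∧ 9 ^ k ≤ n ∧ n < 9 ^ (k + 1) := by
  induction fuel with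
  | zero =>
    intro j n hlo hhi
    simp only [Nat.add_zero] at hhi
    omega
  | succ fuel ih =>
    intro j n hlo hhi
    rw [transNineFindPow]
    have hmul : ((9 ^ j : Nat) : Int) * 9 = ((9 ^ (j + 1) : Nat) : Int) := by
      push_cast [pow_succ]; ring
    have hcond : (((9 ^ j : Nat) : Int) * 9 ≤ (n : Int)) ↔ 9 ^ (j + 1) ≤ n := by
      rw [hmul]; exact_mod_cast Iff.rfl
    by_cases hc : 9 ^ (j + 1) ≤ n
    · rw [if_pos (hcond.mpr hc), hmul]
      exact ih (j + 1) n hc (by rw [show j + 1 + fuel = j + (fuel + 1) by ring]; exact hhi)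
    · rw [if_neg (fun h => hc (hcond.mp h))]
      exact ⟨j, rfl, hlo, by omega⟩

lemma transNineLongDiv_zero (fuel : Nat) (x : Int) (s : List Char) :
    transNineLongDiv fuel x 0 s = s := by
  cases fuel <;> simp [transNineLongDiv]

-- B's second loop appends the padded digit string
set_option maxRecDepth 4096 in
lemma transNineLongDiv_eq : ∀ (k fuel : Nat), k + 1 ≤ fuel → ∀ (n : Nat) (s : List Char),
    n < 9 ^ (k + 1) →
      transNineLongDiv fuel (n : Int) ((9 ^ k : Nat) : Int) s = s ++ pvPadDigs k n := by
  intro k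
  induction k with
  | zero =>
    intro fuel hf n s hn
    match fuel, hf with
    | fuel + 1, _ =>
      have hp : ((9 ^ 0 : Nat) : Int) ≠ 0 := by norm_num
      have h1 : ((9 ^ 0 : Nat) : Int) = 1 := by norm_num
      rw [transNineLongDiv]
      simp only [ne_eq, h1]
      have hd : PySem.Int.floordiv (n : Int) 1 = (n : Int) := by
        have := PySem.Int.floordiv_natCast n 1
        simpa using this
      have hp9 : PySem.Int.floordiv 1 9 = 0 := by decide
      rw [hd, hp9]
      have hx : (n : Int) - (n : Int) * 1 = ((0 : Nat) : Int) := by push_cast; ring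
      rw [hx, transNineLongDiv_zero]
      rw [dchar_cast n]
      rfl
  | succ k ih =>
    intro fuel hf n s hn
    match fuel, hf with
    | fuel + 1, hf =>
      have hp : ((9 ^ (k + 1) : Nat) : Int) ≠ 0 := by positivity
      rw [transNineLongDiv]
      simp only [ne_eq, hp, not_false_eq_true, if_pos]
      have hd : PySem.Int.floordiv (n : Int) ((9 ^ (k + 1) : Nat) : Int)
          = ((n / 9 ^ (k + 1) : Nat) : Int) := PySem.Int.floordiv_natCast n (9 ^ (k + 1))
      have hp9 : PySem.Int.floordiv ((9 ^ (k + 1) : Nat) : Int) 9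
          = ((9 ^ k : Nat) : Int) := by
        rw [floordiv_cast9, show (9 ^ (k + 1) / 9 : Nat) = 9 ^ k by
          rw [pow_succ]; exact Nat.mul_div_cancel _ (by omega)]
      have hx : (n : Int) - ((n / 9 ^ (k + 1) : Nat) : Int) * ((9 ^ (k + 1) : Nat) : Int)
          = ((n % 9 ^ (k + 1) : Nat) : Int) := by
        have hdm : (9 ^ (k + 1) : Nat) * (n / 9 ^ (k + 1)) + n % 9 ^ (k + 1) = n :=
          Nat.div_add_mod n (9 ^ (k + 1))
        have h2 : ((9 ^ (k + 1) : Nat) : Int) * ((n / 9 ^ (k + 1) : Nat) : Int)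
            + ((n % 9 ^ (k + 1) : Nat) : Int) = (n : Int) := by exact_mod_cast hdm
        push_cast at h2 ⊢
        linarith
      rw [hd, hp9, hx, dchar_cast, ih fuel (by omega) (n % 9 ^ (k + 1)) _
        (Nat.mod_lt n (by positivity))]
      simp [pvPadDigs, List.append_assoc]

theorem trans_nine_spec : Claim_equal_trans_nine := by
  intro x hdom hpre
  unfold Spec_trans_nine trans_nine trans_nine_alt
  have hx1 : 1 ≤ x := hpre
  have hx2 : x ≤ 2147483648 := by
    unfold Dom_trans_nine pvDomInt at hdom
    exact (of_decide_eq_true hdom).2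
  obtain ⟨n, rfl⟩ : ∃ n : Nat, x = (n : Int) := ⟨x.toNat, by omega⟩
  have hn1 : 1 ≤ n := by exact_mod_cast hx1
  have hnB : n < 9 ^ 64 := by
    have : n ≤ 2147483648 := by exact_mod_cast hx2
    calc n ≤ 2147483648 := this
      _ < 9 ^ 64 := by norm_num
  have h1 : ((1 : Int)) = ((9 ^ 0 : Nat) : Int) := by norm_num
  rw [h1]
  obtain ⟨k, hfp, hlo, hhi⟩ := transNineFindPow_eq 64 0 n (by simpa using hn1) (by simpa using hnB)
  have hk64 : k + 1 ≤ 64 := by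
    by_contra hcon
    have : 9 ^ 64 ≤ 9 ^ k := Nat.pow_le_pow_right (by omega) (by omega)
    omega
  rw [hfp, transNineLongDiv_eq k 64 hk64 n [] hhi,
    transNineLoop_eq 64 n hnB [], pvPadDigs_eq_pvDigs k n hlo hhi]
  simp
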